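-- pv_equiv track=rewrite | github.com/ColorfulPockets/the_gang | 7-card-hand-simulation.py | has_smaller_straight_house
-- ===== SOURCE A (Python) =====
-- def has_smaller_straight_house(ranks, rank_counts):
--     pair_ranks = {rank for rank, count in rank_counts.items() if count >= 2}
--     if not pair_ranks:
--         return False
--
--     unique = set(ranks)
--     if 1 in unique:
--         unique.add(14)
--
--     sorted_ranks = sorted(unique)
--
--     for i in range(len(sorted_ranks) - 2):
--         first = sorted_ranks[i]
--         second = sorted_ranks[i + 1]
--         third = sorted_ranks[i + 2]
--
--         if second == first + 1 and third == second + 1: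
--             straight_ranks = {1 if rank == 14 else rank for rank in (first, second, third)}
--             if any(pair_rank not in straight_ranks for pair_rank in pair_ranks):
--                 return True
--
--     return False
-- ===== SOURCE B (Python) =====
-- def has_smaller_straight_house(ranks, rank_counts):
--     pair_ranks = {rank for rank, count in rank_counts.items() if count >= 2}
--     if not pair_ranks:
--         return False
--
--     unique = set(ranks)
--     if 1 in unique:
--         unique.add(14)
--
--     return any(
--         low + 1 in unique and low + 2 in unique and
--         any(p not in {1 if r == 14 else r for r in (low, low + 1, low + 2)}
--             for p in pair_ranks)
--         for low in unique)
-- ===== Notes on version B (the rewrite author's own statement) =====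
-- stated objective: alternative
-- what changed: B drops the sorted list and the sliding index window entirely: it tests each distinct rank low for low+1 and low+2 membership in the unique set directly, so no sort is performed.
import Mathlib
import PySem

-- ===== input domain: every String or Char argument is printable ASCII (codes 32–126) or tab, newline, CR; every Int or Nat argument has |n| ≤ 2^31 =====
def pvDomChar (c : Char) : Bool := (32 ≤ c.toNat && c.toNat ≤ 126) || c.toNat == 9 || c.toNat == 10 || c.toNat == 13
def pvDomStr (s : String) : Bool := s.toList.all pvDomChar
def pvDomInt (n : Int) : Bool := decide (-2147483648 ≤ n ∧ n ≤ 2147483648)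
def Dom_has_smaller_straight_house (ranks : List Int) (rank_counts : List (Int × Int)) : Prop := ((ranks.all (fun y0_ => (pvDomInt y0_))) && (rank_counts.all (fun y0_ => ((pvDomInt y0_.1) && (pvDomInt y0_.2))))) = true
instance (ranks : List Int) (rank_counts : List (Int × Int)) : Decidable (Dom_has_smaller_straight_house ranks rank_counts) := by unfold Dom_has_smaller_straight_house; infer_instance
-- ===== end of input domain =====

-- B replaces the sort + sliding-window scan by direct membership tests (low, low+1,
-- low+2 all in the unique set) over the unique set itself; objective: alternative.

-- shared first lines of both Pythons: the set of paired ranks and the unique rank set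
def pvPairRanks (rank_counts : List (Int × Int)) : PySem.Set Int :=
  PySem.Set.ofList (((PySem.Dict.ofList rank_counts).items.filter (fun p => 2 ≤ p.2)).map (fun p => p.1))

def pvUnique (ranks : List Int) : PySem.Set Int :=
  if (PySem.Set.ofList ranks).contains 1 then (PySem.Set.ofList ranks).add 14
  else PySem.Set.ofList ranks

-- ===== PORT A =====
def has_smaller_straight_house (ranks : List Int) (rank_counts : List (Int × Int)) : Bool :=
  let pair_ranks := pvPairRanks rank_counts
  if pair_ranks = [] then false
  else
    let unique := pvUnique ranks
    let sorted_ranks := PySem.List.sorted unique (fun x => x) false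
    (List.range (sorted_ranks.length - 2)).any (fun i =>
      let first := sorted_ranks.getD i 0
      let second := sorted_ranks.getD (i + 1) 0
      let third := sorted_ranks.getD (i + 2) 0
      if second = first + 1 ∧ third = second + 1 then
        let straight_ranks : PySem.Set Int :=
          PySem.Set.ofList ([first, second, third].map (fun r => if r = 14 then 1 else r))
        pair_ranks.any (fun p => !(straight_ranks.contains p))
      else false)

-- ===== PORT B =====
def has_smaller_straight_house_alt (ranks : List Int) (rank_counts : List (Int × Int)) : Bool :=
  let pair_ranks := pvPairRanks rank_counts
  if pair_ranks = [] then false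
  else
    let unique := pvUnique ranks
    unique.any (fun low =>
      unique.contains (low + 1) && (unique.contains (low + 2) &&
        pair_ranks.any (fun p =>
          !((PySem.Set.ofList ([low, low + 1, low + 2].map (fun r => if r = 14 then 1 else r))).contains p))))

-- ===== PRECONDITION & SPEC =====
def Spec_has_smaller_straight_house (ranks : List Int) (rank_counts : List (Int × Int)) (out : Bool) : Prop := out = has_smaller_straight_house_alt ranks rank_counts
instance (ranks : List Int) (rank_counts : List (Int × Int)) (out : Bool) : Decidable (Spec_has_smaller_straight_house ranks rank_counts out) := by unfold Spec_has_smaller_straight_house; infer_instance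

-- ===== CLAIM (what is proved, stated in full; the proofs are below) =====
def Claim_equal_has_smaller_straight_house : Prop := ∀ (ranks : List Int) (rank_counts : List (Int × Int)), Dom_has_smaller_straight_house ranks rank_counts → Spec_has_smaller_straight_house ranks rank_counts (has_smaller_straight_house ranks rank_counts)

-- ===== LEMMAS AND PROOFS =====

-- the unique set has no duplicates
lemma pvUnique_nodup (ranks : List Int) : (pvUnique ranks).Nodup := by
  unfold pvUnique
  split
  · exact PySem.Set.nodup_add _ _ (PySem.Set.nodup_ofList ranks)
  · exact PySem.Set.nodup_ofList ranks

-- in a strictly increasing Int list, three consecutive values sit at consecutive indices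
lemma pv_adjacent : ∀ (S : List Int), S.Pairwise (· < ·) → ∀ a : Int, a ∈ S → a + 1 ∈ S → a + 2 ∈ S →
    ∃ i, i + 2 < S.length ∧ S.getD i 0 = a ∧ S.getD (i + 1) 0 = a + 1 ∧ S.getD (i + 2) 0 = a + 2 := by
  intro S
  induction S with
  | nil => intro _ a ha _ _; simp at ha
  | cons x t ih =>
    intro hpw a ha hb hc
    rw [List.pairwise_cons] at hpw
    obtain ⟨hx, ht⟩ := hpw
    by_cases hxa : x = a
    · subst hxa
      -- a+1 and a+2 are in t
      have hb' : x + 1 ∈ t := by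
        rcases List.mem_cons.mp hb with heq | h'
        · omega
        · assumption
      have hc' : x + 2 ∈ t := by
        rcases List.mem_cons.mp hc with heq | h'
        · omega
        · assumption
      obtain ⟨y, t2, rfl⟩ : ∃ y t2, t = y :: t2 := by
        cases t with
        | nil => simp at hb'
        | cons y t2 => exact ⟨y, t2, rfl⟩
      rw [List.pairwise_cons] at ht
      obtain ⟨hy, ht2⟩ := ht
      have hxy : x < y := hx y (by simp)
      have hy1 : y = x + 1 := by
        rcases List.mem_cons.mp hb' with heq | hb2
        · omega
        · have := hy _ hb2; omega
      subst hy1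
      have hc2 : x + 2 ∈ t2 := by
        rcases List.mem_cons.mp hc' with heq | h
        · omega
        · exact h
      obtain ⟨z, t3, rfl⟩ : ∃ z t3, t2 = z :: t3 := by
        cases t2 with
        | nil => simp at hc2
        | cons z t3 => exact ⟨z, t3, rfl⟩
      rw [List.pairwise_cons] at ht2
      obtain ⟨hz, _⟩ := ht2
      have hz1 : z = x + 2 := by
        have hyz : x + 1 < z := hy z (by simp)
        rcases List.mem_cons.mp hc2 with heq | h
        · omega
        · have := hz _ h; omega
      subst hz1
      exact ⟨0, by simp, rfl, rfl, rfl⟩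
    · have ha' : a ∈ t := by
        rcases ha with _ | h
        · omega
        · assumption
      have hxlt : x < a := hx a ha'
      have hb' : a + 1 ∈ t := by
        rcases List.mem_cons.mp hb with heq | h
        · omega
        · assumption
      have hc' : a + 2 ∈ t := by
        rcases List.mem_cons.mp hc with heq | h
        · omega
        · assumption
      obtain ⟨i, hlen, h1, h2, h3⟩ := ih ht a ha' hb' hc'
      exact ⟨i + 1, by simp; omega, h1, h2, h3⟩

-- the sorted unique list is strictly increasing
lemma pv_sorted_strict (ranks : List Int) :
    (PySem.List.sorted (pvUnique ranks) (fun x => x) false).Pairwise (· < ·) := by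
  have hle := PySem.List.sorted_pairwise (pvUnique ranks) (fun x => x)
  have hnd : (PySem.List.sorted (pvUnique ranks) (fun x => x) false).Nodup :=
    ((PySem.List.sorted_perm (pvUnique ranks) (fun x => x) false).nodup_iff).mpr (pvUnique_nodup ranks)
  exact (hle.and hnd).imp (fun h => lt_of_le_of_ne h.1 h.2)

theorem has_smaller_straight_house_spec : Claim_equal_has_smaller_straight_house := by
  intro ranks rank_counts _
  unfold Spec_has_smaller_straight_house has_smaller_straight_house has_smaller_straight_house_alt
  by_cases hP : pvPairRanks rank_counts = []
  · simp [hP]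
  · simp only [hP, if_false]
    set P := pvPairRanks rank_counts with hPdef
    set U := pvUnique ranks with hUdef
    set S := PySem.List.sorted U (fun x => x) false with hSdef
    have hmem : ∀ x : Int, x ∈ S ↔ x ∈ U := fun x => PySem.List.mem_sorted U _ false x
    have hpw : S.Pairwise (· < ·) := pv_sorted_strict ranks
    -- Boolean equality via propositional equivalence
    rw [Bool.eq_iff_iff]
    simp only [List.any_eq_true, List.mem_range]
    constructor
    · rintro ⟨i, hi, hcond⟩
      -- window found in A
      have hi2 : i + 2 < S.length := by omega
      by_cases hw : S.getD (i + 1) 0 = S.getD i 0 + 1 ∧ S.getD (i + 2) 0 = S.getD (i + 1) 0 + 1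
      case neg => rw [if_neg hw] at hcond; simp at hcond
      case pos =>
        rw [if_pos hw] at hcond
        obtain ⟨h2, h3⟩ := hw
        refine ⟨S.getD i 0, ?_, ?_⟩
        · exact (hmem _).mp (by rw [List.getD_eq_getElem _ _ (by omega)]; exact List.getElem_mem _)
        · simp only [Bool.and_eq_true]
          refine ⟨?_, ?_, ?_⟩
          · rw [PySem.Set.contains_iff]
            rw [← h2]
            exact (hmem _).mp (by rw [List.getD_eq_getElem _ _ (by omega)]; exact List.getElem_mem _)
          · rw [PySem.Set.contains_iff]
            have : S.getD i 0 + 2 = S.getD (i + 2) 0 := by omega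
            rw [this]
            exact (hmem _).mp (by rw [List.getD_eq_getElem _ _ (by omega)]; exact List.getElem_mem _)
          · rw [List.any_eq_true] at hcond ⊢
            obtain ⟨p, hp, hnp⟩ := hcond
            refine ⟨p, hp, ?_⟩
            have e2 : S.getD (i + 1) 0 = S.getD i 0 + 1 := h2
            have e3 : S.getD (i + 2) 0 = S.getD i 0 + 2 := by omega
            rw [← e2, ← e3]
            exact hnp
    · rintro ⟨a, haU, hcond⟩
      simp only [Bool.and_eq_true, PySem.Set.contains_iff] at hcond
      obtain ⟨hb, hc, hq⟩ := hcond
      obtain ⟨i, hlen, h1, h2, h3⟩ :=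
        pv_adjacent S hpw a ((hmem a).mpr haU) ((hmem _).mpr hb) ((hmem _).mpr hc)
      refine ⟨i, by omega, ?_⟩
      rw [if_pos (by omega)]
      rw [List.any_eq_true] at hq ⊢
      obtain ⟨p, hp, hnp⟩ := hq
      refine ⟨p, hp, ?_⟩
      rw [h1, h2, h3]
      exact hnp
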